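-- pv_equiv track=rewrite | github.com/ConvLab/ConvLab-3 | data/unified_datasets/multiwoz21/booking_remapper.py | get_current_domains_from_act
-- ===== SOURCE A (Python) =====
-- def get_current_domains_from_act(dialog_acts):
--
--     current_domains_temp = []
--     for dom_int in dialog_acts:
--         domain, intent = dom_int.split('-')
--         if domain in ["general", "Booking"]:
--             continue
--         if domain not in current_domains_temp:
--             current_domains_temp.append(domain)
--
--     return current_domains_temp
-- ===== SOURCE B (Python) =====
-- def get_current_domains_from_act(dialog_acts):
--     # Backwards single pass: prepend each kept domain and filter its older copy
--     # out of the partial result, so the final list is in first-seen order.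
--     out = []
--     for dom_int in reversed(dialog_acts):
--         domain, intent = dom_int.split('-')
--         if domain in ("general", "Booking"):
--             continue
--         out = [domain] + [d for d in out if d != domain]
--     return out
-- ===== Notes on version B (the rewrite author's own statement) =====
-- stated objective: alternative
-- what changed: Traverses the list back-to-front, prepending each kept domain and filtering its duplicate out of the partial result, instead of A's forward pass with a membership test before appending.
import Mathlib
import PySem

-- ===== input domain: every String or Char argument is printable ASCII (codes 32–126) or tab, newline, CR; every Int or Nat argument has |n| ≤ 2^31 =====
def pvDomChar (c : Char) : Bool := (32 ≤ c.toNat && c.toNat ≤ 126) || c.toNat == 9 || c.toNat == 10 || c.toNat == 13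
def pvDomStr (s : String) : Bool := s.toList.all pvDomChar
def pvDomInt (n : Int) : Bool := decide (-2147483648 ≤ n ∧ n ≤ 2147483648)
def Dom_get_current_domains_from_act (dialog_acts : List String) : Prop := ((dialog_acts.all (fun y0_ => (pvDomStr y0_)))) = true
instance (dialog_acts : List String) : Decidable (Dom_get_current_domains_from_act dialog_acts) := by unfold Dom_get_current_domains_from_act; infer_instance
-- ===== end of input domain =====

-- B traverses the list back-to-front, prepending each kept domain and filtering its
-- duplicate out of the partial result, instead of A's forward membership-test-then-append.

-- ===== PORT A =====
def get_current_domains_from_act (dialog_acts : List String) : List String :=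
  dialog_acts.foldl (fun current_domains_temp dom_int =>
    match PySem.Str.split? dom_int "-" with
    | some [domain, _intent] =>
      if domain = "general" ∨ domain = "Booking" then current_domains_temp
      else if domain ∈ current_domains_temp then current_domains_temp
      else current_domains_temp ++ [domain]
    | _ => current_domains_temp)   -- unreachable under Pre_ (Python raises ValueError here)
  []

-- ===== PORT B =====
def get_current_domains_from_act_alt (dialog_acts : List String) : List String :=
  dialog_acts.reverse.foldl (fun out dom_int =>
    match PySem.Str.split? dom_int "-" with
    | none => out   -- unreachable under Pre_ (Python raises ValueError here)
    | some parts =>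
      -- parts.length = 2 is the two-variable unpack; ≠ 2 is unreachable under Pre_ (ValueError)
      if parts.length = 2 then
        let domain := parts.headD ""
        if domain = "general" ∨ domain = "Booking" then out
        else domain :: out.filter (· ≠ domain)
      else out)
  []

-- ===== PRECONDITION & SPEC =====
-- Pre_ excludes exactly the strings without exactly one '-': there the Python
-- two-variable unpack of split('-') raises ValueError (in both A and B).
def Pre_get_current_domains_from_act (dialog_acts : List String) : Prop :=
  ∀ s ∈ dialog_acts, ((PySem.Str.split? s "-").getD []).length = 2
instance (dialog_acts : List String) : Decidable (Pre_get_current_domains_from_act dialog_acts) := by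
  unfold Pre_get_current_domains_from_act; infer_instance
def pvWitness_get_current_domains_from_act : List String :=
  ["Hotel-Inform", "general-bye", "Hotel-Inform", "Booking-Book", "Taxi-Request"]

def Spec_get_current_domains_from_act (dialog_acts : List String) (out : List String) : Prop := out = get_current_domains_from_act_alt dialog_acts
instance (dialog_acts : List String) (out : List String) : Decidable (Spec_get_current_domains_from_act dialog_acts out) := by unfold Spec_get_current_domains_from_act; infer_instance

-- ===== CLAIM (what is proved, stated in full; the proofs are below) =====
def Claim_equal_get_current_domains_from_act : Prop := ∀ (dialog_acts : List String), Dom_get_current_domains_from_act dialog_acts → Pre_get_current_domains_from_act dialog_acts → Spec_get_current_domains_from_act dialog_acts (get_current_domains_from_act dialog_acts)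

-- ===== LEMMAS AND PROOFS =====

/-- The kept domains one string contributes. -/
def pvEmit (s : String) : List String :=
  match PySem.Str.split? s "-" with
  | some [domain, _intent] => if domain = "general" ∨ domain = "Booking" then [] else [domain]
  | _ => []

/-- A's loop is a Set.add fold over the emitted domains. -/
theorem foldA_eq (xs : List String) (acc : List String) :
    xs.foldl (fun current_domains_temp dom_int =>
      match PySem.Str.split? dom_int "-" with
      | some [domain, _intent] =>
        if domain = "general" ∨ domain = "Booking" then current_domains_temp
        else if domain ∈ current_domains_temp then current_domains_temp
        else current_domains_temp ++ [domain]
      | _ => current_domains_temp) acc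
    = (xs.flatMap pvEmit).foldl PySem.Set.add acc := by
  induction xs generalizing acc with
  | nil => simp
  | cons s xs ih =>
    simp only [List.foldl_cons, List.flatMap_cons, List.foldl_append, ih, pvEmit]
    congr 1
    cases h : PySem.Str.split? s "-" with
    | none => simp
    | some l =>
      match l with
      | [] => simp
      | [d] => simp
      | [d, i] =>
        by_cases hd : d = "general" ∨ d = "Booking"
        · simp [hd]
        · by_cases hm : d ∈ acc <;>
            simp [hd, hm, PySem.Set.add, PySem.Set.contains]
      | d :: i :: x :: r => simp

/-- One step of B's backwards loop. -/
def pvStepR (d : String) (out : List String) : List String := d :: out.filter (· ≠ d)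

/-- B's reversed fold is a foldr of pvStepR over the emitted domains. -/
theorem foldB_eq (xs : List String) :
    xs.reverse.foldl (fun out dom_int =>
      match PySem.Str.split? dom_int "-" with
      | none => out
      | some parts =>
        if parts.length = 2 then
          let domain := parts.headD ""
          if domain = "general" ∨ domain = "Booking" then out
          else domain :: out.filter (· ≠ domain)
        else out) []
    = (xs.flatMap pvEmit).foldr pvStepR [] := by
  rw [List.foldl_reverse]
  induction xs with
  | nil => simp
  | cons s xs ih =>
    simp only [List.foldr_cons, List.flatMap_cons, List.foldr_append, ih, pvEmit]
    cases h : PySem.Str.split? s "-" with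
    | none => simp
    | some l =>
      match l with
      | [] => simp
      | [d] => simp
      | [d, i] =>
        by_cases hd : d = "general" ∨ d = "Booking" <;> simp [hd, pvStepR]
      | d :: i :: x :: r => simp

/-- Forward first-occurrence dedup with an arbitrary accumulator. -/
theorem foldl_add_acc (t : List String) (acc : List String) :
    t.foldl PySem.Set.add acc = acc ++ (t.foldl PySem.Set.add []).filter (· ∉ acc) := by
  induction t generalizing acc with
  | nil => simp
  | cons x t ih =>
    simp only [List.foldl_cons]
    rw [ih (PySem.Set.add acc x), ih (PySem.Set.add [] x)]
    simp only [PySem.Set.add, PySem.Set.contains]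
    by_cases hm : x ∈ acc
    · simp [hm, List.filter_filter]
      apply List.filter_congr
      intro d hd
      by_cases h2 : d = x
      · simp [h2, hm]
      · simp [h2]
    · simp [hm, List.filter_filter]

/-- The backwards prepend-and-filter fold equals the forward Set.add fold. -/
theorem foldr_stepR_eq (t : List String) :
    t.foldr pvStepR [] = t.foldl PySem.Set.add [] := by
  induction t with
  | nil => rfl
  | cons d t ih =>
    simp only [List.foldr_cons, ih, List.foldl_cons]
    have hadd : PySem.Set.add ([] : List String) d = [d] := by
      simp [PySem.Set.add, PySem.Set.contains]
    rw [hadd, foldl_add_acc t [d], pvStepR]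
    simp only [List.cons_append, List.nil_append, List.cons.injEq, true_and]
    apply List.filter_congr
    intro a _
    simp

-- ===== VERDICT (by name: the statement is the Claim_ definition above) =====
theorem get_current_domains_from_act_spec : Claim_equal_get_current_domains_from_act := by
  intro dialog_acts _ _
  unfold Spec_get_current_domains_from_act get_current_domains_from_act get_current_domains_from_act_alt
  rw [foldA_eq, foldB_eq, foldr_stepR_eq]
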